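-- pv_equiv track=rewrite | github.com/wzm123-code/well-log-interpretation-system | backend/tools/supervisor_tools.py | streamable_text_for_report
-- ===== SOURCE A (Python) =====
-- from typing import Dict, List, Optional, Tuple
--
-- def streamable_text_for_report(buffer: str) -> Tuple[str, str]:
--     """
--     流式生成报告时：从累积缓冲中取出「可立即推送到前端」的正文，去掉开头的任务规划 JSON、```json``` 围栏等。
--
--     若开头为未闭合的围栏或未闭合的 `{...}`，返回 ("", buffer)，不向用户展示。
--
--     返回 (emit, carry)：emit 为本次应推送的片段；carry 为尚未展示的后缀缓冲。
--     """
--     if not buffer: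
--         return "", ""
--     b = buffer
--     # 1) 去掉开头的完整 markdown 代码围栏（常为 ```json ... ```）
--     while True:
--         stripped = b.lstrip()
--         if not stripped.startswith("```"):
--             break
--         nl = stripped.find("\n", 3)
--         if nl < 0:
--             return "", buffer
--         rest_after_lang = stripped[nl + 1 :]
--         close = rest_after_lang.find("```")
--         if close < 0:
--             return "", buffer
--         b = b[: len(b) - len(stripped)] + rest_after_lang[close + 3 :]
--
--     stripped = b.lstrip()
--     ws_lead = b[: len(b) - len(stripped)]
--     if not stripped.startswith("{"):
--         return b, ""
--     depth = 0
--     for i, c in enumerate(stripped):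
--         if c == "{":
--             depth += 1
--         elif c == "}":
--             depth -= 1
--             if depth == 0:
--                 rest = ws_lead + stripped[i + 1 :]
--                 return streamable_text_for_report(rest)
--     return "", buffer
-- ===== SOURCE B (Python) =====
-- def _strip_fences(b):
--     # Remove every complete leading markdown code fence; None if an unclosed fence is first.
--     while True:
--         s = b.lstrip()
--         if not s.startswith("```"):
--             return b
--         nl = s.find("\n", 3)
--         if nl < 0:
--             return None
--         close = s.find("```", nl + 1)
--         if close < 0:
--             return None
--         b = b[: len(b) - len(s)] + s[close + 3:]
--
--
-- def _matching_brace(s):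
--     # Index of the '}' closing the '{' that s starts with, or -1 if unbalanced.
--     depth = 0
--     for j, c in enumerate(s):
--         if c == "{":
--             depth += 1
--         elif c == "}":
--             depth -= 1
--             if depth == 0:
--                 return j
--     return -1
--
--
-- def streamable_text_for_report(buffer):
--     current = buffer
--     while True:
--         if not current:
--             return "", ""
--         b = _strip_fences(current)
--         if b is None:
--             return "", current
--         s = b.lstrip()
--         if not s.startswith("{"):
--             return b, ""
--         j = _matching_brace(s)
--         if j < 0:
--             return "", current
--         current = b[: len(b) - len(s)] + s[j + 1:]
-- ===== Notes on version B (the rewrite author's own statement) =====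
-- stated objective: simpler
-- what changed: The tail recursion becomes one outer while-loop on a mutable current buffer, fence stripping and brace matching are factored into helpers, the brace matcher returns an index instead of performing the recursive call, and the fence stripper finds the closing fence with an indexed find on the stripped string instead of slicing out an intermediate rest string.
import Mathlib
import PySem

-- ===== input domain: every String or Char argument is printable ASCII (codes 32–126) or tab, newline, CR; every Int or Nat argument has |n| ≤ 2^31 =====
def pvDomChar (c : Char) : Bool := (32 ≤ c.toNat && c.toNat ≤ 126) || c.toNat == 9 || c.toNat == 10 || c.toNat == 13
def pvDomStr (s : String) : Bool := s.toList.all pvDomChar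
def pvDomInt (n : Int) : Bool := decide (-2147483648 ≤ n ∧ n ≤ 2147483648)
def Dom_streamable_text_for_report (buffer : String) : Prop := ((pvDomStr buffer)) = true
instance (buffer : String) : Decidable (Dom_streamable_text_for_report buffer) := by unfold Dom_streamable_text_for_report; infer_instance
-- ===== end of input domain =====

-- B replaces A's tail recursion by one outer loop with helper functions (brace matcher
-- returning an index, fence stripper using an indexed find); same cost, plainer shape.

-- ===== PORT A =====
-- A's inner `while True` fence loop: `some b` = the loop's break with the current b,
-- `none` = the loop's `return "", buffer`. Fuel is a conservative bound (each pass
-- removes a complete fence, ≥ 7 characters, so `b.length + 1` always suffices).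
def pvAfence (fuel : Nat) (b : List Char) : Option (List Char) :=
  match fuel with
  | 0 => some b
  | fuel + 1 =>
    let stripped := PySem.Chars.lstrip b
    if PySem.Chars.startswith stripped ('`' :: '`' :: '`' :: []) then
      let nl := PySem.Chars.findFrom stripped ['\n'] 3
      if nl < 0 then none
      else
        let rest_after_lang := PySem.Chars.slice stripped (some (nl + 1)) none
        let close := PySem.Chars.find rest_after_lang ('`' :: '`' :: '`' :: [])
        if close < 0 then none
        else pvAfence fuel
          (PySem.Chars.slice b none (some ((b.length : Int) - (stripped.length : Int))) ++
           PySem.Chars.slice rest_after_lang (some (close + 3)) none)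
    else some b

-- A's `for i, c in enumerate(stripped)` brace scan: `some rest` = the `return
-- streamable_text_for_report(rest)` argument, `none` = the loop fell through.
def pvAscan (ws stripped : List Char) (i : Nat) (depth : Int) (rem : List Char) :
    Option (List Char) :=
  match rem with
  | [] => none
  | c :: rem' =>
    if c = '{' then pvAscan ws stripped (i + 1) (depth + 1) rem'
    else if c = '}' then
      if depth - 1 = 0 then
        some (ws ++ PySem.Chars.slice stripped (some ((i : Int) + 1)) none)
      else pvAscan ws stripped (i + 1) (depth - 1) rem'
    else pvAscan ws stripped (i + 1) depth rem'

-- A's top-level tail recursion (fuel: each recursive call passes a strictly shorter buffer).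
def pvAgo (fuel : Nat) (buffer : List Char) : List Char × List Char :=
  match fuel with
  | 0 => ([], [])
  | fuel + 1 =>
    if buffer = [] then ([], [])
    else
      match pvAfence (buffer.length + 1) buffer with
      | none => ([], buffer)
      | some b =>
        let stripped := PySem.Chars.lstrip b
        let ws_lead := PySem.Chars.slice b none (some ((b.length : Int) - (stripped.length : Int)))
        if PySem.Chars.startswith stripped ['{'] then
          match pvAscan ws_lead stripped 0 0 stripped with
          | some rest => pvAgo fuel rest
          | none => ([], buffer)
        else (b, [])

def streamable_text_for_report (buffer : String) : String × String :=
  let r := pvAgo (buffer.toList.length + 1) buffer.toList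
  (String.ofList r.1, String.ofList r.2)

-- ===== PORT B =====
-- B's `_matching_brace`: index of the closing '}' as an Int, -1 if unbalanced.
def pvBmatch (depth : Int) (j : Nat) (rem : List Char) : Int :=
  match rem with
  | [] => -1
  | c :: rem' =>
    if c = '{' then pvBmatch (depth + 1) (j + 1) rem'
    else if c = '}' then
      if depth - 1 = 0 then (j : Int) else pvBmatch (depth - 1) (j + 1) rem'
    else pvBmatch depth (j + 1) rem'

-- B's `_strip_fences`: `none` = Python's None; the closing fence is located with an
-- indexed find on s itself, no intermediate sliced-out string.
def pvBfences (fuel : Nat) (b : List Char) : Option (List Char) :=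
  match fuel with
  | 0 => some b
  | fuel + 1 =>
    let s := PySem.Chars.lstrip b
    if PySem.Chars.startswith s ('`' :: '`' :: '`' :: []) then
      let nl := PySem.Chars.findFrom s ['\n'] 3
      if nl < 0 then none
      else
        let close := PySem.Chars.findFrom s ('`' :: '`' :: '`' :: []) (nl + 1)
        if close < 0 then none
        else pvBfences fuel
          (PySem.Chars.slice b none (some ((b.length : Int) - (s.length : Int))) ++
           PySem.Chars.slice s (some (close + 3)) none)
    else some b

-- B's outer `while True` loop on `current` (fuel: each iteration strictly shrinks current).
def pvBloop (fuel : Nat) (current : List Char) : List Char × List Char :=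
  match fuel with
  | 0 => ([], [])
  | fuel + 1 =>
    if current = [] then ([], [])
    else
      match pvBfences (current.length + 1) current with
      | none => ([], current)
      | some b =>
        let s := PySem.Chars.lstrip b
        if PySem.Chars.startswith s ['{'] then
          let j := pvBmatch 0 0 s
          if j < 0 then ([], current)
          else pvBloop fuel
            (PySem.Chars.slice b none (some ((b.length : Int) - (s.length : Int))) ++
             PySem.Chars.slice s (some (j + 1)) none)
        else (b, [])

def streamable_text_for_report_alt (buffer : String) : String × String :=
  let r := pvBloop (buffer.toList.length + 1) buffer.toList
  (String.ofList r.1, String.ofList r.2)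

-- ===== PRECONDITION & SPEC =====
def Spec_streamable_text_for_report (buffer : String) (out : String × String) : Prop := out = streamable_text_for_report_alt buffer
instance (buffer : String) (out : String × String) : Decidable (Spec_streamable_text_for_report buffer out) := by unfold Spec_streamable_text_for_report; infer_instance

-- ===== CLAIM (what is proved, stated in full; the proofs are below) =====
def Claim_equal_streamable_text_for_report : Prop := ∀ (buffer : String), Dom_streamable_text_for_report buffer → Spec_streamable_text_for_report buffer (streamable_text_for_report buffer)

-- ===== LEMMAS AND PROOFS =====

theorem pvscan_eq_match (rem : List Char) : ∀ (ws s : List Char) (i : Nat) (depth : Int),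
    pvAscan ws s i depth rem =
      (if pvBmatch depth i rem < 0 then none
       else some (ws ++ PySem.Chars.slice s (some (pvBmatch depth i rem + 1)) none)) := by
  induction rem with
  | nil => intro ws s i depth; simp [pvAscan, pvBmatch]
  | cons c rem ih =>
    intro ws s i depth
    simp only [pvAscan, pvBmatch]
    by_cases h1 : c = '{'
    · simp [h1, ih]
    · by_cases h2 : c = '}'
      · by_cases h3 : depth - 1 = 0
        · simp [h2, h3]
        · simp [h2, h3, ih]
      · simp [h1, h2, ih]

theorem pvfence_eq (fuel : Nat) : ∀ (b : List Char), pvAfence fuel b = pvBfences fuel b := by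
  induction fuel with
  | zero => intro b; rfl
  | succ fuel ih =>
    intro b
    simp only [pvAfence, pvBfences]
    set s := PySem.Chars.lstrip b with hs
    by_cases hsw : PySem.Chars.startswith s ('`' :: '`' :: '`' :: []) = true
    · simp only [hsw, if_true]
      have h3 : 3 ≤ s.length := by
        have := (PySem.Chars.startswith_iff s ('`' :: '`' :: '`' :: [])).mp hsw
        simpa using this.length_le
      set nl := PySem.Chars.findFrom s ['\n'] 3 with hnl
      by_cases hneg : nl < 0
      · simp [hneg]
      · simp only [hneg, if_false]
        -- nl points at a '\n' inside s, hence nl.toNat < s.length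
        have h3' : PySem.Chars.findFrom s ['\n'] ((3 : Nat) : Int) = nl := by
          rw [hnl]; norm_num
        have hne : PySem.Chars.findFrom s ['\n'] ((3 : Nat) : Int) ≠ -1 := by
          rw [h3']; omega
        obtain ⟨hge, hpre, -⟩ := PySem.Chars.findFrom_natCast_spec s ['\n'] 3 h3 hne
        rw [h3'] at hge hpre
        have hlt : nl.toNat < s.length := by
          rcases hpre with ⟨t, ht⟩
          have hl := congrArg List.length ht
          simp at hl
          omega
        have hk : nl + 1 = ((nl.toNat + 1 : Nat) : Int) := by omega
        have hkle : nl.toNat + 1 ≤ s.length := by omega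
        have hrest : PySem.Chars.slice s (some (nl + 1)) none = List.drop (nl.toNat + 1) s := by
          rw [PySem.Chars.slice_eq_listSlice, PySem.List.slice_from s (by omega : (0:Int) ≤ nl + 1)]
          congr 1; omega
        rw [hrest]
        set f := PySem.Chars.find (List.drop (nl.toNat + 1) s) ('`' :: '`' :: '`' :: []) with hf
        have hcloseB : PySem.Chars.findFrom s ('`' :: '`' :: '`' :: []) (nl + 1) =
            if f = -1 then -1 else ((nl.toNat + 1 : Nat) : Int) + f := by
          rw [hk]; exact PySem.Chars.findFrom_natCast s _ (nl.toNat + 1) hkle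
        rw [hcloseB]
        have hfge := PySem.Chars.neg_one_le_find (List.drop (nl.toNat + 1) s) ('`' :: '`' :: '`' :: [])
        rw [← hf] at hfge
        by_cases hf1 : f = -1
        · simp [hf1]
        · have hfpos : ¬ (f < 0) := by omega
          rw [if_neg hfpos, if_neg hf1,
              if_neg (by omega : ¬ (((nl.toNat + 1 : Nat) : Int) + f < 0)), ih]
          congr 2
          rw [PySem.Chars.slice_eq_listSlice, PySem.Chars.slice_eq_listSlice,
              PySem.List.slice_from _ (by omega : (0:Int) ≤ f + 3),
              PySem.List.slice_from _ (by omega : (0:Int) ≤ ((nl.toNat + 1 : Nat) : Int) + f + 3),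
              List.drop_drop]
          congr 1; omega
    · simp [hsw]

theorem pvgo_eq_loop (fuel : Nat) : ∀ (buffer : List Char), pvAgo fuel buffer = pvBloop fuel buffer := by
  induction fuel with
  | zero => intro b; rfl
  | succ fuel ih =>
    intro buffer
    simp only [pvAgo, pvBloop, pvfence_eq]
    by_cases hb : buffer = []
    · simp [hb]
    · simp only [hb, if_false]
      cases hf : pvBfences (buffer.length + 1) buffer with
      | none => rfl
      | some b =>
        simp only []
        set s := PySem.Chars.lstrip b with hs
        by_cases hsw : PySem.Chars.startswith s ['{'] = true
        · simp only [hsw, if_true, pvscan_eq_match]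
          by_cases hj : pvBmatch 0 0 s < 0
          · simp [hj]
          · simp [hj, ih]
        · simp [hsw]

-- ===== VERDICT (by name: the statement is the Claim_ definition above) =====
theorem streamable_text_for_report_spec : Claim_equal_streamable_text_for_report := by
  intro buffer _
  unfold Spec_streamable_text_for_report streamable_text_for_report streamable_text_for_report_alt
  rw [pvgo_eq_loop]
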